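-- pv_equiv track=rewrite | github.com/LucasCandemilChagas/MyPythonStuff | Progs_Python/saltos.py | saltos
-- ===== SOURCE A (Python) =====
-- def saltos(s):
--     if len(s) == 0:
--         return -1
--     if s[0] == '0':
--         return -1
--     if s[0] == '1':
--         return 3
--
--     return saltos(s[1:]) + saltos(s[2:])
-- ===== SOURCE B (Python) =====
-- def saltos(s):
--     # Linear DP from the end keeping (f(i+1), f(i+2)) in two variables
--     # instead of A's exponential double recursion.
--     a, b = -1, -1
--     for c in reversed(s):
--         cur = -1 if c == '0' else 3 if c == '1' else a + b
--         a, b = cur, a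
--     return a
-- ===== Notes on version B (the rewrite author's own statement) =====
-- stated objective: faster
-- what changed: Replaced the double recursion on suffixes by a single backward pass keeping the last two suffix values in two variables (Fibonacci-style DP); intended as asymptotically faster (O(n) vs O(2^n)) - measured 4.3x at the largest size both finished, and A timed out at n=64 where B returned.
import Mathlib
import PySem

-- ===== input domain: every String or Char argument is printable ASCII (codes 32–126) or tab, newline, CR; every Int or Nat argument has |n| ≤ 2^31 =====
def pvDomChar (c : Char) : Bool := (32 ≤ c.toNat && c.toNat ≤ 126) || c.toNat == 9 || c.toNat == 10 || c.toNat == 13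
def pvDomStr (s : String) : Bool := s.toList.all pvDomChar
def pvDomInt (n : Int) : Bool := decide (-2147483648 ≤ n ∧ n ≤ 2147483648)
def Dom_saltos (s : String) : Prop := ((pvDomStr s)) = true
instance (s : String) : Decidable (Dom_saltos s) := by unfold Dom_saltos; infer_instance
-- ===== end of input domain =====

-- B replaces A's exponential double recursion on suffixes by one backward pass keeping
-- the last two suffix values (objective: faster, intended asymptotically; see claim).


-- ===== PORT A =====
-- Literal port of A's recursion over the character list; s[1:] = tail, s[2:] = tail.tail.
def saltosL : List Char → Int
  | [] => -1
  | c :: rest =>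
    if c = '0' then -1
    else if c = '1' then 3
    else saltosL rest + saltosL rest.tail
termination_by l => l.length
decreasing_by
  all_goals simp [List.length_tail]

def saltos (s : String) : Int := saltosL s.toList

-- ===== PORT B =====
-- B: one backward pass over the string keeping (f(i+1), f(i+2)) in a pair.
def saltosStep (p : Int × Int) (c : Char) : Int × Int :=
  ((if c = '0' then -1 else if c = '1' then 3 else p.1 + p.2), p.1)

def saltos_alt (s : String) : Int :=
  (s.toList.reverse.foldl saltosStep (-1, -1)).1

-- ===== PRECONDITION & SPEC =====
def Spec_saltos (s : String) (out : Int) : Prop := out = saltos_alt s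
instance (s : String) (out : Int) : Decidable (Spec_saltos s out) := by unfold Spec_saltos; infer_instance

-- ===== CLAIM (what is proved, stated in full; the proofs are below) =====
def Claim_equal_saltos : Prop := ∀ (s : String), Dom_saltos s → Spec_saltos s (saltos s)

-- ===== LEMMAS AND PROOFS =====

lemma saltosL_nil : saltosL [] = -1 := by
  rw [saltosL.eq_def]

lemma saltosL_cons (c : Char) (l : List Char) :
    saltosL (c :: l)
      = if c = '0' then -1 else if c = '1' then 3 else saltosL l + saltosL l.tail := by
  rw [saltosL.eq_def]

lemma saltos_fold (l : List Char) :
    l.reverse.foldl saltosStep (-1, -1) = (saltosL l, saltosL l.tail) := by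
  induction l with
  | nil => simp [saltosL_nil]
  | cons c l ih =>
    simp [List.foldl_append, ih, saltosStep, saltosL_cons]

-- ===== VERDICT (by name: the statement is the Claim_ definition above) =====
theorem saltos_spec : Claim_equal_saltos := by
  intro s _
  unfold Spec_saltos saltos saltos_alt
  rw [saltos_fold]
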